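-- pv_equiv track=rewrite | github.com/Bekaboo/ECE448-CS440-UIUC | mp08/submitted.py | _find_hapax
-- ===== SOURCE A (Python) =====
-- def _find_hapax(train):
--     word_count = {}
--     for sentence in train:
--         for word, tag in sentence:
--             if word not in word_count:
--                 word_count[word] = 0
--             word_count[word] += 1
--     return [word for word, count in word_count.items() if count == 1]
-- ===== SOURCE B (Python) =====
-- def _find_hapax(train):
--     once = {}          # insertion-ordered: words currently seen exactly once
--     seen_again = set() # words seen two or more times
--     for sentence in train:
--         for word, tag in sentence:
--             if word in seen_again:
--                 pass
--             elif word in once: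
--                 del once[word]
--                 seen_again.add(word)
--             else:
--                 once[word] = None
--     return list(once)
-- ===== Notes on version B (the rewrite author's own statement) =====
-- stated objective: alternative
-- what changed: Instead of counting every word and filtering the count table in a second pass, B maintains a live insertion-ordered 'currently hapax' dict and a 'seen again' set in one pass, deleting a word from the dict the moment it repeats and returning the dict's keys directly.
import Mathlib
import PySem

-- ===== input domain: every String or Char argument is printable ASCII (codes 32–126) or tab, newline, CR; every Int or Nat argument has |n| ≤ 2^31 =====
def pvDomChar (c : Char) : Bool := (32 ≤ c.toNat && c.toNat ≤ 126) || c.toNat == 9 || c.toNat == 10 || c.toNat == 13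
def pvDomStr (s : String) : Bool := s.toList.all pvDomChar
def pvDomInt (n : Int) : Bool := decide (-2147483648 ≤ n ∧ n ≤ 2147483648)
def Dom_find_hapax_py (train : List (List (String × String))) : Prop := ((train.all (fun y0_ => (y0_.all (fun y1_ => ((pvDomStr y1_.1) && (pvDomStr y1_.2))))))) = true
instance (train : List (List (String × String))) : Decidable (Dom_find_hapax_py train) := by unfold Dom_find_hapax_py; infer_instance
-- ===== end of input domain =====

-- B replaces A's count-then-filter (build a full count table, then a second pass over its
-- items) by a single pass that keeps a live insertion-ordered dict of currently-hapax words
-- and a set of repeated words; objective: alternative (same asymptotic cost).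

-- ===== PORT A =====
def find_hapax_py (train : List (List (String × String))) : List String :=
  let word_count : PySem.Dict String Int :=
    train.foldl (fun d sentence =>
      sentence.foldl (fun d wt =>
        let d := if d.contains wt.1 then d else d.insert wt.1 0
        d.modify wt.1 0 (· + 1)) d) PySem.Dict.empty
  (word_count.items.filter (fun p => p.2 == 1)).map (·.1)

-- ===== PORT B =====
def bStep (st : PySem.Dict String Unit × PySem.Set String) (wt : String × String) :
    PySem.Dict String Unit × PySem.Set String :=
  if st.2.contains wt.1 then st
  else if st.1.contains wt.1 then (st.1.erase wt.1, st.2.add wt.1)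
  else (st.1.insert wt.1 (), st.2)

def find_hapax_py_alt (train : List (List (String × String))) : List String :=
  let st : PySem.Dict String Unit × PySem.Set String :=
    train.foldl (fun st sentence => sentence.foldl bStep st)
      (PySem.Dict.empty, PySem.Set.ofList [])
  st.1.keys

-- ===== PRECONDITION & SPEC =====
def Spec_find_hapax_py (train : List (List (String × String))) (out : List String) : Prop := out = find_hapax_py_alt train
instance (train : List (List (String × String))) (out : List String) : Decidable (Spec_find_hapax_py train out) := by unfold Spec_find_hapax_py; infer_instance

-- ===== CLAIM (what is proved, stated in full; the proofs are below) =====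
def Claim_equal_find_hapax_py : Prop := ∀ (train : List (List (String × String))), Dom_find_hapax_py train → Spec_find_hapax_py train (find_hapax_py train)

-- ===== LEMMAS AND PROOFS =====

-- the stream of words both programs actually look at
def pvWords (train : List (List (String × String))) : List String :=
  train.flatten.map (·.1)

-- A's per-word update is exactly the Counter update
theorem aStep_eq (d : PySem.Dict String Int) (w : String) :
    (if d.contains w then d else d.insert w 0).modify w 0 (· + 1)
      = d.modify w 0 (· + 1) := by
  by_cases h : d.contains w
  · simp [h]
  · have hc : d.contains w = false := by simpa using h
    simp only [h]
    simp [PySem.Dict.modify, PySem.Dict.insert_insert_self,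
      PySem.Dict.getD_insert_self, PySem.Dict.getD_of_not_contains d 0 hc]

theorem a_eq_filter (train : List (List (String × String))) :
    find_hapax_py train
      = (PySem.Set.ofList (pvWords train)).filter
          (fun w => ((pvWords train).count w : Int) == 1) := by
  unfold find_hapax_py
  simp only [aStep_eq, ← List.foldl_flatten]
  have hmap : (pvWords train).foldl (fun d w => d.modify w 0 (· + 1))
        (PySem.Dict.empty : PySem.Dict String Int)
      = train.flatten.foldl (fun d wt => d.modify wt.1 0 (· + 1)) PySem.Dict.empty :=
    List.foldl_map
  rw [← hmap]
  rw [← PySem.Dict.counter_eq_foldl, PySem.Dict.items_counter, List.filter_map]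
  simp [Function.comp_def]

-- B's word-level step
def bstepW (st : PySem.Dict String Unit × PySem.Set String) (w : String) :
    PySem.Dict String Unit × PySem.Set String :=
  if st.2.contains w then st
  else if st.1.contains w then (st.1.erase w, st.2.add w)
  else (st.1.insert w (), st.2)

theorem b_invariant (ws : List String) :
    ((ws.foldl bstepW (PySem.Dict.empty, PySem.Set.ofList [])).1.items
        = ((PySem.Set.ofList ws).filter (fun w => ws.count w == 1)).map (fun w => (w, ())))
      ∧ ∀ w, w ∈ (ws.foldl bstepW (PySem.Dict.empty, PySem.Set.ofList [])).2
          ↔ 2 ≤ ws.count w := by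
  induction ws using List.reverseRecOn with
  | nil =>
    refine ⟨rfl, fun w => ?_⟩
    simp [PySem.Set.ofList]
  | append_singleton ws w ih =>
    obtain ⟨h1, h2⟩ := ih
    simp only [List.foldl_append, List.foldl_cons, List.foldl_nil]
    by_cases hs : 2 ≤ ws.count w
    · -- already repeated: state unchanged
      have hc : (ws.foldl bstepW (PySem.Dict.empty, PySem.Set.ofList [])).2.contains w = true :=
        (PySem.Set.contains_iff _ _).mpr ((h2 w).mpr hs)
      simp only [bstepW, hc, if_true]
      have hmem : w ∈ PySem.Set.ofList ws := by
        rw [PySem.Set.mem_ofList]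
        exact List.count_pos_iff.mp (by omega)
      rw [PySem.Set.ofList_append_singleton, PySem.Set.add_of_mem hmem]
      refine ⟨h1.trans ?_, fun u => ?_⟩
      · congr 1
        refine (List.filter_congr (fun u hu => ?_)).symm
        by_cases huw : u = w
        · subst huw
          simp [List.count_append]
          omega
        · have hwu : ¬ w = u := fun h => huw h.symm
          simp [List.count_append, List.count_nil, hwu]
      · rw [h2 u, List.count_append]
        by_cases huw : u = w
        · subst huw; simp only [List.count_singleton]; omega
        · have hwu : ¬ w = u := fun h => huw h.symm
          simp [List.count_nil, hwu]
    · by_cases h1c : ws.count w = 1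
      · -- currently hapax: move from once to seen
        have hcs : (ws.foldl bstepW (PySem.Dict.empty, PySem.Set.ofList [])).2.contains w = false := by
          rw [← Bool.not_eq_true, PySem.Set.contains_iff, h2]; omega
        have hmem : w ∈ PySem.Set.ofList ws := by
          rw [PySem.Set.mem_ofList]; exact List.count_pos_iff.mp (by omega)
        have hco : (ws.foldl bstepW (PySem.Dict.empty, PySem.Set.ofList [])).1.contains w = true := by
          rw [PySem.Dict.contains_iff_mem_keys]
          simp only [PySem.Dict.keys, h1]
          simp only [List.map_map, List.mem_map, List.mem_filter]
          exact ⟨w, ⟨⟨hmem, by simp [h1c]⟩, rfl⟩⟩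
        simp only [bstepW, hcs, hco, if_true, Bool.false_eq_true, if_false]
        constructor
        · simp only [PySem.Dict.erase, h1, List.filter_map, List.filter_filter]
          rw [PySem.Set.ofList_append_singleton, PySem.Set.add_of_mem hmem]
          congr 1
          refine (List.filter_congr (fun u hu => ?_)).symm
          by_cases huw : u = w
          · subst huw
            simp [List.count_append, h1c]
          · have hwu : ¬ w = u := fun h => huw h.symm
            simp [List.count_append, List.count_nil, hwu, huw]
        · intro u
          rw [PySem.Set.mem_add, h2 u, List.count_append]
          by_cases huw : u = w
          · subst huw; simp [h1c]
          · have hwu : ¬ w = u := fun h => huw h.symm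
            simp [List.count_nil, hwu]
            exact fun h => absurd h huw
      · -- fresh word: insert into once
        have hz : ws.count w = 0 := by omega
        have hnm : w ∉ ws := by
          intro hm; have := List.count_pos_iff.mpr hm; omega
        have hcs : (ws.foldl bstepW (PySem.Dict.empty, PySem.Set.ofList [])).2.contains w = false := by
          rw [← Bool.not_eq_true, PySem.Set.contains_iff, h2]; omega
        have hco : (ws.foldl bstepW (PySem.Dict.empty, PySem.Set.ofList [])).1.contains w = false := by
          rw [← Bool.not_eq_true, PySem.Dict.contains_iff_mem_keys]
          simp only [PySem.Dict.keys, h1]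
          simp only [List.map_map, List.mem_map, List.mem_filter]
          rintro ⟨u, ⟨⟨hu, -⟩, rfl⟩⟩
          exact hnm ((PySem.Set.mem_ofList _ _).mp hu)
        simp only [bstepW, hcs, hco, Bool.false_eq_true, if_false]
        constructor
        · rw [PySem.Dict.items_insert_of_not_contains _ _ hco, h1,
            PySem.Set.ofList_append_singleton, PySem.Set.add_of_not_mem (by
              rw [PySem.Set.mem_ofList]; exact hnm)]
          rw [List.filter_append, List.map_append]
          congr 1
          · congr 1
            refine (List.filter_congr (fun u hu => ?_)).symm
            have hwu : ¬ w = u := fun h => hnm (h ▸ (PySem.Set.mem_ofList _ _).mp hu)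
            simp [List.count_append, List.count_nil, hwu]
          · simp [List.count_append, hz]
        · intro u
          rw [h2 u, List.count_append]
          by_cases huw : u = w
          · subst huw; simp [hz]
          · have hwu : ¬ w = u := fun h => huw h.symm
            simp [List.count_nil, hwu]
theorem b_eq_filter (train : List (List (String × String))) :
    find_hapax_py_alt train
      = (PySem.Set.ofList (pvWords train)).filter
          (fun w => (pvWords train).count w == 1) := by
  unfold find_hapax_py_alt
  simp only [← List.foldl_flatten]
  have hmap : (pvWords train).foldl bstepW (PySem.Dict.empty, PySem.Set.ofList [])
      = train.flatten.foldl bStep (PySem.Dict.empty, PySem.Set.ofList []) := by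
    rw [pvWords, List.foldl_map]
    rfl
  rw [← hmap]
  show (List.foldl bstepW _ _).1.items.map _ = _
  rw [(b_invariant (pvWords train)).1]
  simp [Function.comp_def]

-- ===== VERDICT (by name: the statement is the Claim_ definition above) =====
theorem find_hapax_py_spec : Claim_equal_find_hapax_py := by
  intro train _
  show _ = _
  rw [a_eq_filter, b_eq_filter]
  refine List.filter_congr (fun w _ => ?_)
  by_cases h : (pvWords train).count w = 1
  · simp [h]
  · simp [h, show ¬((pvWords train).count w : Int) = 1 from by exact_mod_cast h]
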